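-- pv_equiv track=rewrite | github.com/KishorKrs/Master_tools | excel_csv.py | compare_row
-- ===== SOURCE A (Python) =====
-- def compare_row(row1, row2):
--     idx = []
--     if len(row1) >= len(row2):
--         data_row1 = row1
--         data_row2 = row2
--     else:
--         data_row1 = row2
--         data_row2 = row1
--
--     for i, val in enumerate(data_row1):
--         try:
--             if data_row2[i] != val:
--                 idx.append(i)
--         except:
--             idx.append(i)
--
--     return idx
-- ===== SOURCE B (Python) =====
-- def compare_row(row1, row2):
--     n1, n2 = len(row1), len(row2)
--     agree = {i for i in range(min(n1, n2)) if row1[i] == row2[i]}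
--     return [i for i in range(max(n1, n2)) if i not in agree]
-- ===== Notes on version B (the rewrite author's own statement) =====
-- stated objective: alternative
-- what changed: B inverts the logic: it first builds a hash set of the positions where the two rows AGREE (over the common region), then returns the complement of that set over all indices of the longer row, instead of A's longer-row-first scan that appends mismatch indices inside a try/except.
import Mathlib
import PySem

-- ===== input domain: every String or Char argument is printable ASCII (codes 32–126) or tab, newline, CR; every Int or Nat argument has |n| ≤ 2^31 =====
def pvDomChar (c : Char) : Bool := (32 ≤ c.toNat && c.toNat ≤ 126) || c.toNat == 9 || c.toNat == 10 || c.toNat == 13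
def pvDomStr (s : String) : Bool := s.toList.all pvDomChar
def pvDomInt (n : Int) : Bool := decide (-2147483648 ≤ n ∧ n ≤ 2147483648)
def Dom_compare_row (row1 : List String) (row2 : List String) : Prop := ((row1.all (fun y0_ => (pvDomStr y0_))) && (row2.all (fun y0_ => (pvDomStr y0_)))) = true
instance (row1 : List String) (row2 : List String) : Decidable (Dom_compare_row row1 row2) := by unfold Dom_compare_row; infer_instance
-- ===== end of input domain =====

-- B inverts the logic: a set of AGREEING positions over the common region, then the
-- complement of that set over all indices of the longer row (objective: alternative).

-- ===== PORT A =====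
def compare_row (row1 : List String) (row2 : List String) : List Int :=
  let dr := if row1.length ≥ row2.length then (row1, row2) else (row2, row1)
  (PySem.List.enumerate dr.1 0).foldl (fun idx p =>
    match PySem.List.pyGet? dr.2 p.1 with
    | some w => if w ≠ p.2 then idx ++ [p.1] else idx   -- try: data_row2[i] != val
    | none => idx ++ [p.1]) []                          -- except (IndexError): append i

-- ===== PORT B =====
def compare_row_alt (row1 : List String) (row2 : List String) : List Int :=
  let n1 : Int := row1.length
  let n2 : Int := row2.length
  -- i ranges over range(min(n1,n2)), so row1[i] / row2[i] are in range: pyGet? is `some` there (exact)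
  let agree : PySem.Set Int := PySem.Set.ofList
    ((PySem.List.pyRange 0 (min n1 n2) 1).filterMap
      (fun i => if PySem.List.pyGet? row1 i = PySem.List.pyGet? row2 i then some i else none))
  (PySem.List.pyRange 0 (max n1 n2) 1).filter (fun i => !(PySem.Set.contains agree i))

-- ===== PRECONDITION & SPEC =====
def Spec_compare_row (row1 : List String) (row2 : List String) (out : List Int) : Prop := out = compare_row_alt row1 row2
instance (row1 : List String) (row2 : List String) (out : List Int) : Decidable (Spec_compare_row row1 row2 out) := by unfold Spec_compare_row; infer_instance

-- ===== CLAIM (what is proved, stated in full; the proofs are below) =====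
def Claim_equal_compare_row : Prop := ∀ (row1 : List String) (row2 : List String), Dom_compare_row row1 row2 → Spec_compare_row row1 row2 (compare_row row1 row2)

-- ===== LEMMAS AND PROOFS =====

-- Recursive characterisation of the diff indices starting at position n
-- (longer row first; a missing right-hand element always yields the index).
def diffSpec (d1 d2 : List String) (n : Nat) : List Int :=
  match d1, d2 with
  | [], _ => []
  | _ :: t1, [] => (n : Int) :: diffSpec t1 [] (n + 1)
  | v :: t1, w :: t2 => (if w ≠ v then [(n : Int)] else []) ++ diffSpec t1 t2 (n + 1)

-- B's agreement list (the filterMap inside compare_row_alt, abstracted for the proofs)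
def agreeL (X Y : List String) : List Int :=
  (PySem.List.pyRange 0 (min (X.length : Int) (Y.length : Int)) 1).filterMap
    (fun i => if PySem.List.pyGet? X i = PySem.List.pyGet? Y i then some i else none)

-- A's loop equals diffSpec: r is the unconsumed suffix of the shorter row.
lemma loopA (d1 : List String) : ∀ (d2 r : List String) (n : Nat) (acc : List Int),
    r = d2.drop n →
    (PySem.List.enumerate d1 (n:Int)).foldl (fun idx p =>
      match PySem.List.pyGet? d2 p.1 with
      | some w => if w ≠ p.2 then idx ++ [p.1] else idx
      | none => idx ++ [p.1]) acc = acc ++ diffSpec d1 r n := by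
  induction d1 with
  | nil => intro d2 r n acc _; simp [PySem.List.enumerate_nil, diffSpec]
  | cons v t1 ih =>
    intro d2 r n acc hr
    rw [PySem.List.enumerate_cons]
    simp only [List.foldl_cons]
    have hget : PySem.List.pyGet? d2 (n:Int) = r.head? := by
      rw [hr, List.head?_drop]; simp [pysem]
    have hr' : r.tail = d2.drop (n+1) := by rw [hr, List.tail_drop]
    have hcast : ((n:Int) + 1) = ((n+1 : Nat) : Int) := by push_cast; ring
    cases r with
    | nil =>
      simp only [hget, List.head?_nil]
      rw [hcast, ih d2 [] (n+1) (acc ++ [(n:Int)]) (by simpa using hr'.symm)]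
      simp [diffSpec]
    | cons w t2 =>
      simp only [hget, List.head?_cons]
      rw [hcast]
      by_cases hvw : w = v
      · simp only [hvw, ne_eq, not_true_eq_false, if_false]
        rw [ih d2 t2 (n+1) acc (by simpa using hr')]
        simp [diffSpec]
      · simp only [ne_eq, hvw, not_false_eq_true, if_true]
        rw [ih d2 t2 (n+1) (acc ++ [(n:Int)]) (by simpa using hr')]
        simp [diffSpec, hvw]

-- membership in the agreement list
lemma mem_agreeL (X Y : List String) (i : Int) :
    i ∈ agreeL X Y ↔ 0 ≤ i ∧ i < min (X.length : Int) (Y.length : Int) ∧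
      PySem.List.pyGet? X i = PySem.List.pyGet? Y i := by
  unfold agreeL
  simp only [List.mem_filterMap, PySem.List.mem_pyRange_one]
  constructor
  · rintro ⟨a, ⟨h0, hlt⟩, ha⟩
    by_cases h : PySem.List.pyGet? X a = PySem.List.pyGet? Y a
    · simp only [h, if_true, Option.some.injEq] at ha; subst ha; exact ⟨h0, hlt, h⟩
    · simp [h] at ha
  · rintro ⟨h0, hlt, h⟩
    exact ⟨i, ⟨h0, hlt⟩, by simp [h]⟩

-- the agreement list is symmetric in the two rows
lemma agreeL_comm (X Y : List String) : agreeL X Y = agreeL Y X := by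
  unfold agreeL
  rw [min_comm]
  apply List.filterMap_congr
  intro i _
  by_cases h : PySem.List.pyGet? X i = PySem.List.pyGet? Y i
  · rw [if_pos h, if_pos h.symm]
  · rw [if_neg h, if_neg (fun e => h e.symm)]

-- diffSpec (longer row first) equals B's complement filter against the agreement set.
lemma specC (X Y : List String) (xs : List String) :
    ∀ (ys : List String) (n : Nat), xs = X.drop n → ys = Y.drop n →
    diffSpec xs ys n = (PySem.List.pyRange (n:Int) (X.length : Int) 1).filter
      (fun i => !(PySem.Set.contains (PySem.Set.ofList (agreeL X Y)) i)) := by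
  induction xs with
  | nil =>
    intro ys n hx _
    have hn : X.length ≤ n := by
      by_contra h
      exact absurd hx.symm (by simp [List.drop_eq_nil_iff]; omega)
    rw [PySem.List.pyRange_one_eq_nil (by exact_mod_cast hn)]
    simp [diffSpec]
  | cons v t1 ih =>
    intro ys n hx hy
    have hn : n < X.length := by
      by_contra h
      rw [List.drop_eq_nil_of_le (by omega)] at hx; exact absurd hx (by simp)
    have hgx : PySem.List.pyGet? X (n:Int) = some v := by
      rw [PySem.List.pyGet?_natCast, ← List.head?_drop, ← hx]; rfl
    have ht1 : t1 = X.drop (n+1) := by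
      rw [← List.tail_drop, ← hx]; rfl
    have hcons : PySem.List.pyRange (n:Int) (X.length : Int) 1
        = (n:Int) :: PySem.List.pyRange ((n:Int)+1) (X.length : Int) 1 :=
      PySem.List.pyRange_one_cons (by exact_mod_cast hn)
    have hcast : ((n:Int) + 1) = ((n+1 : Nat) : Int) := by push_cast; ring
    rw [hcons, List.filter_cons, hcast]
    have hmem : ((n:Int) ∈ PySem.Set.ofList (agreeL X Y)) ↔
        ((n:Int) < (Y.length : Int) ∧ PySem.List.pyGet? X (n:Int) = PySem.List.pyGet? Y (n:Int)) := by
      rw [PySem.Set.mem_ofList, mem_agreeL]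
      constructor
      · rintro ⟨_, hlt, h⟩; exact ⟨lt_of_lt_of_le hlt (min_le_right _ _), h⟩
      · rintro ⟨hlt, h⟩
        refine ⟨by positivity, lt_min (by exact_mod_cast hn) hlt, h⟩
    cases ys with
    | nil =>
      have hny : Y.length ≤ n := by
        by_contra h
        exact absurd hy.symm (by simp [List.drop_eq_nil_iff]; omega)
      have hnot : ¬ ((n:Int) ∈ PySem.Set.ofList (agreeL X Y)) := by
        rw [hmem]; rintro ⟨hlt, _⟩; exact absurd hlt (by exact_mod_cast by omega)
      have hb : (!(PySem.Set.contains (PySem.Set.ofList (agreeL X Y)) (n:Int))) = true := by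
        simp at hnot ⊢
        exact hnot
      rw [hb]
      simp only [if_true]
      rw [diffSpec, ih [] (n+1) ht1 (by rw [List.drop_eq_nil_of_le (by omega)])]
    | cons w t2 =>
      have hny : n < Y.length := by
        by_contra h
        rw [List.drop_eq_nil_of_le (by omega)] at hy; exact absurd hy (by simp)
      have hgy : PySem.List.pyGet? Y (n:Int) = some w := by
        rw [PySem.List.pyGet?_natCast, ← List.head?_drop, ← hy]; rfl
      have ht2 : t2 = Y.drop (n+1) := by
        rw [← List.tail_drop, ← hy]; rfl
      rw [diffSpec, ih t2 (n+1) ht1 ht2]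
      by_cases hvw : w = v
      · have hin : ((n:Int) ∈ PySem.Set.ofList (agreeL X Y)) := by
          rw [hmem]; exact ⟨by exact_mod_cast hny, by rw [hgx, hgy, hvw]⟩
        have hb : (!(PySem.Set.contains (PySem.Set.ofList (agreeL X Y)) (n:Int))) = false := by
          simp
          exact (PySem.Set.mem_ofList _ _).mp hin
        rw [hb]
        simp [hvw]
      · have hnot : ¬ ((n:Int) ∈ PySem.Set.ofList (agreeL X Y)) := by
          rw [hmem]; rintro ⟨_, h⟩
          rw [hgx, hgy] at h
          exact hvw (Option.some.injEq .. ▸ h).symm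
        have hb : (!(PySem.Set.contains (PySem.Set.ofList (agreeL X Y)) (n:Int))) = true := by
          simp at hnot ⊢
          exact hnot
        rw [hb]
        simp [hvw]

-- ===== VERDICT (by name: the statement is the Claim_ definition above) =====
theorem compare_row_spec : Claim_equal_compare_row := by
  intro row1 row2 _
  unfold Spec_compare_row compare_row compare_row_alt
  by_cases h : row1.length ≥ row2.length
  · simp only [h, if_true]
    rw [show (0:Int) = ((0:Nat):Int) from rfl,
      loopA row1 row2 row2 0 [] (by simp), List.nil_append,
      specC row1 row2 row1 row2 0 (by simp) (by simp)]
    have h1 : max (row1.length : Int) (row2.length : Int) = (row1.length : Int) := by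
      omega
    simp only [h1, agreeL, Nat.cast_zero]
  · simp only [h, if_false]
    rw [not_le] at h
    rw [show (0:Int) = ((0:Nat):Int) from rfl,
      loopA row2 row1 row1 0 [] (by simp), List.nil_append,
      specC row2 row1 row2 row1 0 (by simp) (by simp),
      agreeL_comm row2 row1]
    have h1 : max (row1.length : Int) (row2.length : Int) = (row2.length : Int) := by
      omega
    simp only [h1, agreeL, Nat.cast_zero]
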